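-- pv_equiv track=rewrite | github.com/MarkSon-42/CodingTest_Python | PCCP/외톨이 문자열 풀이.py | solution
-- ===== SOURCE A (Python) =====
-- import collections
--
-- def solution(input_string):
--     answer = ""
--     sh = collections.defaultdict(int)
--     prev = None  # null 객체임
--     for cur in input_string:
--         if cur != prev:
--             sh[cur] += 1
--         prev = cur
--
--     for [key, val] in sh.items():
--         if val > 1:
--             answer += key
--
--     if len(answer) == 0:
--         return "N"
--
--     return "".join(sorted(answer))
-- ===== SOURCE B (Python) =====
-- def solution(input_string):
--     # A character is "lonely" iff it still occurs after its first maximal run: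
--     # jump to its first occurrence, strip that run, and test membership.
--     result = []
--     for c in sorted(set(input_string)):
--         tail = input_string[input_string.find(c):].lstrip(c)
--         if c in tail:
--             result.append(c)
--     return "".join(result) or "N"
-- ===== Notes on version B (the rewrite author's own statement) =====
-- stated objective: alternative
-- what changed: Replaces A's single-pass prev-tracking run counter with a defaultdict by a per-character membership test: for each distinct character, jump to its first occurrence with find, strip that run with lstrip, and call it lonely iff it still occurs in the remaining suffix (no run counting, no dict).
import Mathlib
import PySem

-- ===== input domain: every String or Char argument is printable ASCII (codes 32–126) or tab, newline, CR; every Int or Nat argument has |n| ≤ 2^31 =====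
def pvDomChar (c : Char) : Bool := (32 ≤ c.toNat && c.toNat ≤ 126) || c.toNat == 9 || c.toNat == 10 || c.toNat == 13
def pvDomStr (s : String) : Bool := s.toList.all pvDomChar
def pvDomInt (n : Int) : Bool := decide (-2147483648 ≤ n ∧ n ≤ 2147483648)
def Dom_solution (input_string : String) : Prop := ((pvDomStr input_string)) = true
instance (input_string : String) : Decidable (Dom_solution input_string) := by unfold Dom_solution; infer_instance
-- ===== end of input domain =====

-- B replaces A's fused run-counting dict loop by a per-distinct-character test (find first occurrence, strip that run, test membership in the rest) — an alternative decomposition, same result.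

-- ===== PORT A =====
def solution (input_string : String) : String :=
  let st := input_string.toList.foldl
    (fun (p : PySem.Dict Char Int × Option Char) cur =>
      ((if some cur ≠ p.2 then p.1.modify cur 0 (· + 1) else p.1), some cur))
    (PySem.Dict.empty, none)
  let answer := st.1.items.foldl
    (fun (acc : List Char) kv => if kv.2 > 1 then acc ++ [kv.1] else acc) []
  if answer.length = 0 then "N"
  else String.ofList (PySem.List.sorted answer (fun x => x) false)

-- ===== PORT B =====
-- input_string[input_string.find(c):].lstrip(c): lstrip with a ONE-CHAR argument removes
-- exactly the leading occurrences of that char = dropWhile (· == c) (exact on this call).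
def lonelyTail (l : List Char) (c : Char) : List Char :=
  (PySem.List.slice l (some (PySem.Chars.find l [c])) none).dropWhile (· == c)

def solution_alt (input_string : String) : String :=
  let l := input_string.toList
  -- for c in sorted(set(input_string)): if c in tail: result.append(c)
  let result := (PySem.List.sorted (PySem.Set.ofList l) (fun x => x) false).foldl
    (fun (acc : List Char) c =>
      if (lonelyTail l c).contains c then acc ++ [c] else acc) []
  -- "".join(result) or "N"
  if result.isEmpty then "N" else String.ofList result

-- ===== PRECONDITION & SPEC =====
def Spec_solution (input_string : String) (out : String) : Prop := out = solution_alt input_string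
instance (input_string : String) (out : String) : Decidable (Spec_solution input_string out) := by unfold Spec_solution; infer_instance

-- ===== CLAIM (what is proved, stated in full; the proofs are below) =====
def Claim_equal_solution : Prop := ∀ (input_string : String), Dom_solution input_string → Spec_solution input_string (solution input_string)

-- ===== LEMMAS AND PROOFS =====

-- one key per maximal run of equal characters (proof-side characterisation of A's loop)
def groupKeys : List Char → List Char
  | [] => []
  | c :: rest => c :: groupKeys (rest.dropWhile (· == c))
termination_by l => l.length
decreasing_by
  exact Nat.lt_succ_of_le (List.length_dropWhile_le _ _)

-- keys that A's prev-tracking loop increments, given the previous character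
def keysWith (prev : Option Char) : List Char → List Char
  | [] => []
  | c :: rest => if some c ≠ prev then c :: keysWith (some c) rest else keysWith (some c) rest

lemma foldA_eq_counter (l : List Char) : ∀ (d : PySem.Dict Char Int) (prev : Option Char),
    (l.foldl
      (fun (p : PySem.Dict Char Int × Option Char) cur =>
        ((if some cur ≠ p.2 then p.1.modify cur 0 (· + 1) else p.1), some cur))
      (d, prev)).1
    = (keysWith prev l).foldl (fun d x => d.modify x 0 (· + 1)) d := by
  induction l with
  | nil => intro d prev; rfl
  | cons c rest ih =>
    intro d prev
    simp only [List.foldl_cons, keysWith]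
    rcases eq_or_ne (some c) prev with h | h
    · rw [if_neg (by simp [h]), if_neg (by simp [h])]
      exact ih d (some c)
    · rw [if_pos h, if_pos h, List.foldl_cons]
      exact ih (d.modify c 0 (· + 1)) (some c)

lemma keysWith_some (l : List Char) : ∀ c : Char,
    keysWith (some c) l = groupKeys (l.dropWhile (· == c)) := by
  induction l with
  | nil => intro c; simp [keysWith, groupKeys]
  | cons c' rest ih =>
    intro c
    by_cases h : c' = c
    · subst h
      simp [keysWith, ih]
    · simp [keysWith, h, groupKeys, ih]

lemma keysWith_none (l : List Char) : keysWith none l = groupKeys l := by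
  cases l with
  | nil => simp [keysWith, groupKeys]
  | cons c rest => simp [keysWith, groupKeys, keysWith_some]

lemma answer_eq (items : List (Char × Int)) :
    items.foldl (fun (acc : List Char) kv => if kv.2 > 1 then acc ++ [kv.1] else acc) []
      = (items.filter (fun kv => kv.2 > 1)).map Prod.fst := by
  simpa using PySem.List.foldl_append_if (fun kv : Char × Int => decide (kv.2 > 1)) Prod.fst items []

lemma result_eq (chars : List Char) (l : List Char) :
    chars.foldl (fun (acc : List Char) c =>
        if (lonelyTail l c).contains c then acc ++ [c] else acc) []
      = chars.filter (fun c => (lonelyTail l c).contains c) := by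
  simpa using PySem.List.foldl_append_if
    (fun c : Char => (lonelyTail l c).contains c) id chars []

lemma mem_groupKeys (l : List Char) (c : Char) : c ∈ groupKeys l ↔ c ∈ l := by
  match l with
  | [] => simp [groupKeys]
  | a :: r =>
    rw [groupKeys]
    have ih := mem_groupKeys (r.dropWhile (· == a)) c
    constructor
    · intro h
      rcases List.mem_cons.mp h with h | h
      · simp [h]
      · have := ih.mp h
        exact List.mem_cons_of_mem _ ((List.dropWhile_sublist _).mem this)
    · intro h
      rcases List.mem_cons.mp h with h | h
      · simp [h]
      · by_cases hac : c = a
        · simp [hac]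
        · refine List.mem_cons_of_mem _ (ih.mpr ?_)
          have h' : c ∈ r.takeWhile (· == a) ++ r.dropWhile (· == a) := by
            rw [List.takeWhile_append_dropWhile]; exact h
          rcases List.mem_append.mp h' with hm | hm
          · exact absurd (by simpa using List.mem_takeWhile_imp hm) hac
          · exact hm
termination_by l.length
decreasing_by exact Nat.lt_succ_of_le (List.length_dropWhile_le _ _)

-- drop at the first occurrence of c = dropWhile (· ≠ c)
lemma drop_first_eq_dropWhile (l : List Char) (c : Char) : ∀ (k : Nat),
    [c] <+: l.drop k → (∀ i, i < k → ¬ [c] <+: l.drop i) →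
    l.drop k = l.dropWhile (fun x => x != c) := by
  induction l with
  | nil =>
    intro k h _
    simp at h
  | cons a r ih =>
    intro k h hmin
    cases k with
    | zero =>
      have ha : a = c := by
        rcases h with ⟨t, ht⟩
        simpa using congrArg (·.head?) ht.symm
      simp [ha]
    | succ k' =>
      have hane : a ≠ c := by
        intro hac
        exact hmin 0 (Nat.succ_pos _) (by simp [hac])
      have : r.drop k' = r.dropWhile (fun x => x != c) := by
        refine ih k' (by simpa using h) ?_
        intro i hi hpre
        exact hmin (i + 1) (by omega) (by simpa using hpre)
      simpa [List.dropWhile_cons, hane] using this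

lemma lonelyTail_eq (l : List Char) (c : Char) (hc : c ∈ l) :
    lonelyTail l c = (l.dropWhile (fun x => x != c)).dropWhile (· == c) := by
  have hinf : [c] <:+: l := (List.singleton_infix_iff c l).mpr hc
  have h0 : (0 : Int) ≤ PySem.Chars.find l [c] := (PySem.Chars.find_nonneg_iff l [c]).mpr hinf
  have hspec := PySem.Chars.find_spec (s := l) (sub := [c]) h0
  unfold lonelyTail
  rw [PySem.List.slice_from _ h0,
    drop_first_eq_dropWhile l c _ hspec.1 hspec.2]

-- the core characterisation: c occurs after its first run ↔ c heads at least two runs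
lemma lonely_iff (l : List Char) (c : Char) :
    c ∈ (l.dropWhile (fun x => x != c)).dropWhile (· == c) ↔ 2 ≤ (groupKeys l).count c := by
  match l with
  | [] => simp [groupKeys]
  | a :: r =>
    by_cases h : a = c
    · subst h
      have h1 : (a :: r).dropWhile (fun x => x != a) = a :: r := by
        simp
      rw [h1, groupKeys]
      have h2 : (a :: r).dropWhile (· == a) = r.dropWhile (· == a) := by
        simp
      rw [h2, List.count_cons_self]
      have hm := mem_groupKeys (r.dropWhile (· == a)) a
      constructor
      · intro hmem
        have : 0 < (groupKeys (r.dropWhile (· == a))).count a :=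
          List.count_pos_iff.mpr (hm.mpr hmem)
        omega
      · intro hcnt
        have : 0 < (groupKeys (r.dropWhile (· == a))).count a := by omega
        exact hm.mp (List.count_pos_iff.mp this)
    · have ih := lonely_iff (r.dropWhile (· == a)) c
      rw [groupKeys, List.count_cons_of_ne (by simpa using h)]
      have h1 : (a :: r).dropWhile (fun x => x != c) = r.dropWhile (fun x => x != c) := by
        simp [h]
      have h2 : r.dropWhile (fun x => x != c)
          = (r.dropWhile (· == a)).dropWhile (fun x => x != c) := by
        conv_lhs => rw [← List.takeWhile_append_dropWhile (p := (· == a)) (l := r)]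
        rw [List.dropWhile_append]
        have hnil : (r.takeWhile (· == a)).dropWhile (fun x => x != c) = [] := by
          rw [List.dropWhile_eq_nil_iff]
          intro x hx
          have := List.mem_takeWhile_imp hx
          simp at this ⊢
          simp [this, h]
        simp [hnil]
      rw [h1, h2]
      exact ih
termination_by l.length
decreasing_by exact Nat.lt_succ_of_le (List.length_dropWhile_le _ _)

-- ===== VERDICT (by name: the statement is the Claim_ definition above) =====
theorem solution_spec : Claim_equal_solution := by
  intro s _
  show solution s = solution_alt s
  set l := s.toList with hl
  have hA : (l.foldl
      (fun (p : PySem.Dict Char Int × Option Char) cur =>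
        ((if some cur ≠ p.2 then p.1.modify cur 0 (· + 1) else p.1), some cur))
      (PySem.Dict.empty, none)).1 = PySem.Dict.counter (groupKeys l) := by
    rw [foldA_eq_counter, keysWith_none, ← PySem.Dict.counter_eq_foldl]
  have hans :
      (PySem.Dict.counter (groupKeys l)).items.foldl
        (fun (acc : List Char) kv => if kv.2 > 1 then acc ++ [kv.1] else acc) []
      = (PySem.Set.ofList (groupKeys l)).filter
          (fun k => decide (((groupKeys l).count k : Int) > 1)) := by
    rw [answer_eq, PySem.Dict.items_counter, List.filter_map, List.map_map]
    simp [Function.comp_def]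
  -- the two filtered character lists are the same sorted list
  set answer := (PySem.Set.ofList (groupKeys l)).filter
      (fun k => decide (((groupKeys l).count k : Int) > 1)) with hansdef
  set result := (PySem.List.sorted (PySem.Set.ofList l) (fun x => x) false).filter
      (fun c => (lonelyTail l c).contains c) with hresdef
  have hpair : result.Pairwise (fun a b : Char => a < b) :=
    (PySem.List.sorted_ofList_pairwise_lt (xs := l)).filter _
  have hmem : ∀ c : Char, c ∈ result ↔ c ∈ answer := by
    intro c
    rw [hresdef, hansdef, List.mem_filter, List.mem_filter,
      PySem.List.mem_sorted, PySem.Set.mem_ofList, PySem.Set.mem_ofList]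
    constructor
    · rintro ⟨hcl, hct⟩
      have hmem2 : c ∈ (l.dropWhile (fun x => x != c)).dropWhile (· == c) := by
        have h' := List.contains_iff_mem.mp hct
        rwa [lonelyTail_eq l c hcl] at h'
      have h2 : 2 ≤ (groupKeys l).count c := (lonely_iff l c).mp hmem2
      have hpos : 0 < (groupKeys l).count c := by omega
      exact ⟨List.count_pos_iff.mp hpos,
        by simp only [decide_eq_true_eq]; omega⟩
    · rintro ⟨hgk, hcnt⟩
      have hcnt2 : 2 ≤ (groupKeys l).count c := by
        simp at hcnt; omega
      have hcl : c ∈ l := (mem_groupKeys l c).mp hgk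
      refine ⟨hcl, List.contains_iff_mem.mpr ?_⟩
      rw [lonelyTail_eq l c hcl]
      exact (lonely_iff l c).mpr hcnt2
  have hnd_res : result.Nodup :=
    ((PySem.List.sorted_perm _ _ _).nodup_iff.mpr (PySem.Set.nodup_ofList l)).filter _
  have hnd_ans : answer.Nodup := (PySem.Set.nodup_ofList (groupKeys l)).filter _
  have hperm : result.Perm answer :=
    (List.perm_ext_iff_of_nodup hnd_res hnd_ans).mpr hmem
  have hsorted : PySem.List.sorted answer (fun x => x) false = result :=
    PySem.List.sorted_eq_of_perm_of_pairwise_lt answer result (fun x => x) hperm hpair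
  simp only [solution, solution_alt, ← hl, hA, hans, result_eq, ← hresdef]
  by_cases hempty : answer = []
  · have : result = [] := by rw [← hsorted, hempty]; rfl
    simp [hempty, this]
  · have hres : result ≠ [] := by
      intro h
      exact hempty (by rwa [← hsorted, PySem.List.sorted_eq_nil_iff] at h)
    simp [List.length_eq_zero_iff, hempty, List.isEmpty_iff, hres, hsorted]
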